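-- pv_equiv track=rewrite | github.com/h8man13/h8man-finance | services/market_data/app/utils/symbols.py | infer_market_currency
-- ===== SOURCE A (Python) =====
-- from typing import Tuple
--
-- def infer_market_currency(sym: str) -> Tuple[str, str]:
--     """
--     Infer (market, currency) for a normalized symbol.
--     - Crypto pairs are considered USD at source.
--     - EUR markets (no USD->EUR FX applied): .XETRA, .F, .AS, .PA, .BR, .LS, .MI, .MC, .HE
--     - Default to US, USD.
--     """
--     s = sym.strip().upper()
--     if "-" in s:
--         return ("CRYPTO", "USD")
--
--     # Treat these exchanges as EUR-denominated like XETRA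
--     eur_suffixes = [
--         ".XETRA",
--         ".F",   # Frankfurt
--         ".AS",  # Amsterdam
--         ".PA",  # Paris
--         ".BR",  # Brussels
--         ".LS",  # Lisbon
--         ".MI",  # Milan
--         ".MC",  # Madrid
--         ".HE",  # Helsinki
--     ]
--
--     for suf in eur_suffixes:
--         if s.endswith(suf):
--             market = "XETRA" if suf == ".XETRA" else suf.lstrip(".")
--             return (market, "EUR")
--
--     return ("US", "USD")
-- ===== SOURCE B (Python) =====
-- from typing import Tuple
--
-- _EUR_CODES = {"XETRA", "F", "AS", "PA", "BR", "LS", "MI", "MC", "HE"}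
--
-- def infer_market_currency(sym: str) -> Tuple[str, str]:
--     # Single forward pass: track a dash flag, a dot flag, and the segment since the last dot.
--     seg = []
--     seen_dot = False
--     dash = False
--     for ch in sym.strip().upper():
--         if ch == "-":
--             dash = True
--         elif ch == ".":
--             seen_dot = True
--             seg = []
--         else:
--             seg.append(ch)
--     if dash:
--         return ("CRYPTO", "USD")
--     tail = "".join(seg)
--     if seen_dot and tail in _EUR_CODES:
--         return (tail, "EUR")
--     return ("US", "USD")
-- ===== Notes on version B (the rewrite author's own statement) =====
-- stated objective: alternative
-- what changed: Replaces the nine repeated endswith scans with a single forward character pass that maintains dash-seen/dot-seen flags and the segment since the last dot, then classifies by one set-membership test on that segment (market always equals the suffix body, so no per-suffix table is needed).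
import Mathlib
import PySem

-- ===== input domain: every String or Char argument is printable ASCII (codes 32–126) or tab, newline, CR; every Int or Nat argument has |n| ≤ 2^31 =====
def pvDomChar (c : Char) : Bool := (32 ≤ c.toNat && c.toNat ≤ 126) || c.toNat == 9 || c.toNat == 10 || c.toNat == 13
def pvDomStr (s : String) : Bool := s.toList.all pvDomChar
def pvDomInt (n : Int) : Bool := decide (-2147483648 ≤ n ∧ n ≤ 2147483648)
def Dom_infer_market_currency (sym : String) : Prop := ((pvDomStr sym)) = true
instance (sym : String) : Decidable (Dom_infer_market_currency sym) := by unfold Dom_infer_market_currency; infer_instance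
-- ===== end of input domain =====

-- B replaces A's repeated endswith scans with ONE forward character pass maintaining
-- (segment-since-last-dot, dot-seen, dash-seen) state, then a set membership on the segment
-- (objective: alternative; same return value everywhere).

-- ===== PORT A =====
-- exact port of `suf.lstrip(".")`: drop all leading '.' characters
def pyLstripDot (cs : List Char) : List Char := cs.dropWhile (fun c => c == '.')

def inferLoopA (s : String) : List String → String × String
  | [] => ("US", "USD")
  | suf :: rest =>
    if PySem.Str.endswith s suf then
      ((if suf == ".XETRA" then "XETRA" else String.ofList (pyLstripDot suf.toList)), "EUR")
    else inferLoopA s rest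

def infer_market_currency (sym : String) : String × String :=
  let s := PySem.Str.upper (PySem.Str.strip sym)
  if PySem.Str.isIn "-" s then ("CRYPTO", "USD")
  else
    inferLoopA s [".XETRA", ".F", ".AS", ".PA", ".BR", ".LS", ".MI", ".MC", ".HE"]

-- ===== PORT B =====
-- one loop iteration: '-' sets the dash flag, '.' sets the dot flag and resets the segment,
-- anything else is appended to the segment
def stepB (st : List Char × Bool × Bool) (c : Char) : List Char × Bool × Bool :=
  if c == '-' then (st.1, st.2.1, true)
  else if c == '.' then ([], true, st.2.2)
  else (st.1 ++ [c], st.2.1, st.2.2)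

def infer_market_currency_alt (sym : String) : String × String :=
  let st := (PySem.Str.upper (PySem.Str.strip sym)).toList.foldl stepB ([], false, false)
  if st.2.2 then ("CRYPTO", "USD")
  else
    let tail := String.ofList st.1
    if st.2.1 && ["XETRA", "F", "AS", "PA", "BR", "LS", "MI", "MC", "HE"].contains tail then
      (tail, "EUR")
    else ("US", "USD")

-- ===== PRECONDITION & SPEC =====
def Spec_infer_market_currency (sym : String) (out : String × String) : Prop := out = infer_market_currency_alt sym
instance (sym : String) (out : String × String) : Decidable (Spec_infer_market_currency sym out) := by unfold Spec_infer_market_currency; infer_instance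

-- ===== CLAIM =====
def Claim_equal_infer_market_currency : Prop := ∀ (sym : String), Dom_infer_market_currency sym → Spec_infer_market_currency sym (infer_market_currency sym)

-- ===== LEMMAS AND PROOFS =====

/-- The segment B's fold accumulates: the characters after the last dot, minus the dashes. -/
def tailSeg (cs : List Char) : List Char :=
  ((cs.reverse.takeWhile (fun c => c != '.')).filter (fun c => c != '-')).reverse

/-- Invariant of B's single pass. -/
lemma foldB_eq (cs : List Char) :
    cs.foldl stepB ([], false, false) = (tailSeg cs, cs.contains '.', cs.contains '-') := by
  induction cs using List.reverseRecOn with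
  | nil => rfl
  | append_singleton cs c ih =>
    rw [List.foldl_append, ih]
    by_cases h1 : c = '-'
    · subst h1
      simp [stepB, tailSeg, List.filter_append, List.takeWhile_append]
    · by_cases h2 : c = '.'
      · subst h2
        simp [stepB, tailSeg]
      · simp [stepB, tailSeg, h1, h2]
        exact ⟨fun hc => absurd hc.symm h2, fun hc => absurd hc.symm h1⟩

/-- A string ends with `'.'::p` (p dot-free) iff it contains a dot and the dot-free tail after the
last dot, read reversed, is `p.reverse`. -/
lemma endswith_dot_iff (cs p : List Char) (hp : ∀ c ∈ p, (c != '.') = true) :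
    PySem.Chars.endswith cs ('.' :: p) = true ↔
      (('.' : Char) ∈ cs ∧ cs.reverse.takeWhile (fun c => c != '.') = p.reverse) := by
  rw [PySem.Chars.endswith_iff, ← List.reverse_prefix, List.reverse_cons]
  constructor
  · rintro ⟨rest, hr⟩
    rw [List.append_assoc] at hr
    constructor
    · rw [← List.mem_reverse, ← hr]; simp
    · rw [← hr, List.takeWhile_append]
      have hrev : ∀ c ∈ p.reverse, (c != '.') = true := by
        intro c hc; exact hp c (List.mem_reverse.mp hc)
      simp [List.takeWhile_eq_self_iff.mpr hrev]
  · rintro ⟨hmem, ht⟩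
    set d := cs.reverse.dropWhile (fun c => c != '.') with hd
    have hsplit : cs.reverse.takeWhile (fun c => c != '.') ++ d = cs.reverse :=
      List.takeWhile_append_dropWhile
    have hdne : d ≠ [] := by
      intro h0
      have : ('.' : Char) ∈ cs.reverse.takeWhile (fun c => c != '.') := by
        rw [← List.mem_reverse] at hmem
        rw [← hsplit, h0, List.append_nil] at hmem; exact hmem
      have := List.mem_takeWhile_imp (p := fun c => c != '.') this
      simp at this
    have hhead : d.head hdne = '.' := by
      have := List.head_dropWhile_not (p := fun c => c != '.') (l := cs.reverse) hdne
      simpa using this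
    refine ⟨d.tail, ?_⟩
    rw [List.append_assoc, ← ht]
    calc cs.reverse.takeWhile (fun c => c != '.') ++ (['.'] ++ d.tail)
        = cs.reverse.takeWhile (fun c => c != '.') ++ ('.' :: d.tail) := rfl
      _ = cs.reverse.takeWhile (fun c => c != '.') ++ (d.head hdne :: d.tail) := by rw [hhead]
      _ = cs.reverse.takeWhile (fun c => c != '.') ++ d := by rw [List.cons_head_tail]
      _ = cs.reverse := hsplit

/-- With a dot present, an `endswith` test is exactly a comparison of the reversed last-dot tail. -/
lemma endswith_eq_decide (cs p : List Char) (hp : ∀ c ∈ p, (c != '.') = true)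
    (hmem : ('.' : Char) ∈ cs) :
    PySem.Chars.endswith cs ('.' :: p) =
      decide (cs.reverse.takeWhile (fun c => c != '.') = p.reverse) := by
  by_cases h : cs.reverse.takeWhile (fun c => c != '.') = p.reverse
  · simp [h, (endswith_dot_iff _ _ hp).mpr ⟨hmem, h⟩]
  · have hne : PySem.Chars.endswith cs ('.' :: p) ≠ true := fun hT =>
      h ((endswith_dot_iff _ _ hp).mp hT).2
    simp [h, Bool.eq_false_iff.mpr hne]

/-- Without a dot, no dotted suffix can match. -/
lemma endswith_dot_false (cs p : List Char) (h : ('.' : Char) ∉ cs) :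
    PySem.Chars.endswith cs ('.' :: p) = false := by
  rw [Bool.eq_false_iff]
  intro hT
  rw [PySem.Chars.endswith_iff] at hT
  exact h (hT.mem (List.mem_cons_self))

/-- B's rebuilt tail string equals a literal iff the reversed tail equals the literal reversed. -/
lemma lit_key_iff (lit : String) (p : List Char) (hl : lit = String.ofList p)
    (t : List Char) :
    (String.ofList t.reverse = lit) ↔ t = p.reverse := by
  rw [hl, String.ofList_inj]
  constructor
  · intro h
    rw [← h, List.reverse_reverse]
  · intro h; rw [h, List.reverse_reverse]

set_option maxRecDepth 8192 in
set_option maxHeartbeats 2000000 in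
lemma main_eq (sym : String) : infer_market_currency sym = infer_market_currency_alt sym := by
  have e1 : infer_market_currency sym =
      (if PySem.Str.isIn "-" (PySem.Str.upper (PySem.Str.strip sym)) then ("CRYPTO", "USD")
       else inferLoopA (PySem.Str.upper (PySem.Str.strip sym))
         [".XETRA", ".F", ".AS", ".PA", ".BR", ".LS", ".MI", ".MC", ".HE"]) := rfl
  have e2 : infer_market_currency_alt sym =
      (if (tailSeg (PySem.Str.upper (PySem.Str.strip sym)).toList,
            (PySem.Str.upper (PySem.Str.strip sym)).toList.contains '.',
            (PySem.Str.upper (PySem.Str.strip sym)).toList.contains '-').2.2 then ("CRYPTO", "USD")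
       else if ((PySem.Str.upper (PySem.Str.strip sym)).toList.contains '.' &&
            ["XETRA", "F", "AS", "PA", "BR", "LS", "MI", "MC", "HE"].contains
              (String.ofList (tailSeg (PySem.Str.upper (PySem.Str.strip sym)).toList))) then
         (String.ofList (tailSeg (PySem.Str.upper (PySem.Str.strip sym)).toList), "EUR")
       else ("US", "USD")) := by
    unfold infer_market_currency_alt
    rw [foldB_eq]
  rw [e1, e2]
  set s := PySem.Str.upper (PySem.Str.strip sym) with hs
  clear_value s
  clear e1 e2 hs
  have hdash_iff : PySem.Str.isIn "-" s = s.toList.contains '-' := by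
    by_cases h : ('-' : Char) ∈ s.toList
    · rw [List.contains_iff_mem.mpr h, (PySem.Str.isIn_iff_infix _ _).mpr
        (by simpa using (List.singleton_infix_iff _ _).mpr h)]
    · have hF : PySem.Str.isIn "-" s = false := by
        rw [Bool.eq_false_iff]
        intro hT
        exact h ((List.singleton_infix_iff _ _).mp
          (by simpa using (PySem.Str.isIn_iff_infix _ _).mp hT))
      rw [hF, List.contains_eq_mem]
      simp [h]
  by_cases hdash : ('-' : Char) ∈ s.toList
  · rw [hdash_iff, List.contains_iff_mem.mpr hdash]
    rfl
  · have hd : s.toList.contains '-' = false := by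
      rw [List.contains_eq_mem]; simp [hdash]
    rw [hdash_iff, hd]
    simp only [if_neg Bool.false_ne_true, Bool.false_eq_true, if_false]
    by_cases hdot : ('.' : Char) ∈ s.toList
    · have hdt : s.toList.contains '.' = true := List.contains_iff_mem.mpr hdot
      rw [hdt]
      -- no dashes at all, so the filter in tailSeg is the identity
      have hfilter : tailSeg s.toList = (s.toList.reverse.takeWhile (fun c => c != '.')).reverse := by
        unfold tailSeg
        congr 1
        apply List.filter_eq_self.mpr
        intro c hc
        have : c ∈ s.toList := List.mem_reverse.mp ((List.takeWhile_sublist _).subset hc)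
        have hne : c ≠ '-' := fun h => hdash (h ▸ this)
        simpa using hne
      rw [hfilter]
      simp only [inferLoopA]
      simp only [PySem.Str.endswith_eq,
        show (".XETRA" : String).toList = '.' :: ['X','E','T','R','A'] from by decide,
        show (".F" : String).toList = '.' :: ['F'] from by decide,
        show (".AS" : String).toList = '.' :: ['A','S'] from by decide,
        show (".PA" : String).toList = '.' :: ['P','A'] from by decide,
        show (".BR" : String).toList = '.' :: ['B','R'] from by decide,
        show (".LS" : String).toList = '.' :: ['L','S'] from by decide,
        show (".MI" : String).toList = '.' :: ['M','I'] from by decide,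
        show (".MC" : String).toList = '.' :: ['M','C'] from by decide,
        show (".HE" : String).toList = '.' :: ['H','E'] from by decide]
      rw [endswith_eq_decide s.toList ['X','E','T','R','A'] (by simp) hdot,
        endswith_eq_decide s.toList ['F'] (by simp) hdot,
        endswith_eq_decide s.toList ['A','S'] (by simp) hdot,
        endswith_eq_decide s.toList ['P','A'] (by simp) hdot,
        endswith_eq_decide s.toList ['B','R'] (by simp) hdot,
        endswith_eq_decide s.toList ['L','S'] (by simp) hdot,
        endswith_eq_decide s.toList ['M','I'] (by simp) hdot,
        endswith_eq_decide s.toList ['M','C'] (by simp) hdot,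
        endswith_eq_decide s.toList ['H','E'] (by simp) hdot]
      set t := s.toList.reverse.takeWhile (fun c => c != '.') with hT
      clear_value t
      clear hT hfilter
      simp only [List.contains, List.elem_cons, List.elem_nil, Bool.beq_eq_decide_eq,
        Bool.true_and, decide_eq_true_eq,
        lit_key_iff "XETRA" ['X','E','T','R','A'] (by decide),
        lit_key_iff "F" ['F'] (by decide),
        lit_key_iff "AS" ['A','S'] (by decide),
        lit_key_iff "PA" ['P','A'] (by decide),
        lit_key_iff "BR" ['B','R'] (by decide),
        lit_key_iff "LS" ['L','S'] (by decide),
        lit_key_iff "MI" ['M','I'] (by decide),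
        lit_key_iff "MC" ['M','C'] (by decide),
        lit_key_iff "HE" ['H','E'] (by decide)]
      split_ifs <;> first | decide | (simp_all <;> decide)
    · have hdt : s.toList.contains '.' = false := by
        simp [List.contains_iff_mem, hdot]
      rw [hdt]
      simp only [inferLoopA]
      simp only [PySem.Str.endswith_eq,
        show (".XETRA" : String).toList = '.' :: ['X','E','T','R','A'] from by decide,
        show (".F" : String).toList = '.' :: ['F'] from by decide,
        show (".AS" : String).toList = '.' :: ['A','S'] from by decide,
        show (".PA" : String).toList = '.' :: ['P','A'] from by decide,
        show (".BR" : String).toList = '.' :: ['B','R'] from by decide,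
        show (".LS" : String).toList = '.' :: ['L','S'] from by decide,
        show (".MI" : String).toList = '.' :: ['M','I'] from by decide,
        show (".MC" : String).toList = '.' :: ['M','C'] from by decide,
        show (".HE" : String).toList = '.' :: ['H','E'] from by decide]
      simp [endswith_dot_false _ _ hdot]

-- ===== VERDICT =====
theorem infer_market_currency_spec : Claim_equal_infer_market_currency := by
  intro sym _
  unfold Spec_infer_market_currency
  exact main_eq sym
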